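-- pv_equiv track=rewrite | github.com/annoviko/sandbox | advent-2018/06/solution.py | find_closest_center
-- ===== SOURCE A (Python) =====
-- def manhattan_distance(point1, point2):
--     return abs(point1[0] - point2[0]) + abs(point1[1] - point2[1])
--
-- def find_closest_center(point, centers):
--     best_center = 0
--     best_distance = manhattan_distance(point, centers[best_center])
--
--     argue = False
--     for index_center in range(1, len(centers)):
--         distance = manhattan_distance(point, centers[index_center])
--         if distance < best_distance:
--             best_center = index_center
--             best_distance = distance
--             argue = False
--
--         elif distance == best_distance:
--             argue = True
--
--     if argue: return None
--     else: return best_center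
-- ===== SOURCE B (Python) =====
-- def manhattan_distance(point1, point2):
--     return abs(point1[0] - point2[0]) + abs(point1[1] - point2[1])
--
-- def find_closest_center(point, centers):
--     dists = [manhattan_distance(point, c) for c in centers]
--     best = min(dists)
--     if dists.count(best) > 1:
--         return None
--     return dists.index(best)
-- ===== Notes on version B (the rewrite author's own statement) =====
-- stated objective: simpler
-- what changed: Replaces A's fused running-best scan with a tie flag by a build-then-reduce shape: compute the distance list once, then use min/count/index to decide the answer; Pre_ excludes empty centers, where A raises IndexError (B raises ValueError).
import Mathlib
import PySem

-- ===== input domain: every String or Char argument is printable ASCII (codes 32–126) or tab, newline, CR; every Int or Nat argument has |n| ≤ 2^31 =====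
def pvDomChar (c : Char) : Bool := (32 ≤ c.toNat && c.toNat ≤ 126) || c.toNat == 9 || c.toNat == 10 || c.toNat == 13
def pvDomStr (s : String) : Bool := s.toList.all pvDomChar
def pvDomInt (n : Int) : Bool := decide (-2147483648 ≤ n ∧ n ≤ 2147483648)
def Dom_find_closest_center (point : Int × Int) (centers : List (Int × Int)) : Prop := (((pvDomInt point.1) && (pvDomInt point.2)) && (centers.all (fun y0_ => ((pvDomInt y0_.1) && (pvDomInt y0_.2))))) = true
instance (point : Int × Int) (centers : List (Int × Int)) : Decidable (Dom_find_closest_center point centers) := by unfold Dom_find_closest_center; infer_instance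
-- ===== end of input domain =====

-- B replaces A's fused running-best scan (with a tie flag) by a build-then-reduce
-- shape (distance list, then min/count/index); objective: simpler.

-- ===== PORT A =====
def manhattan_distance (point1 point2 : Int × Int) : Int :=
  |point1.1 - point2.1| + |point1.2 - point2.2|

-- A's for-loop over range(1, len(centers)): structural recursion over the tail,
-- carrying the same state (index_center, best_center, best_distance, argue).
def pvLoopA (point : Int × Int) : List (Int × Int) → Int → Int → Int → Bool → Int × Int × Bool
  | [], _, bc, bd, argue => (bc, bd, argue)
  | c :: rest, i, bc, bd, argue =>
    let d := manhattan_distance point c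
    if d < bd then pvLoopA point rest (i + 1) i d false
    else if d = bd then pvLoopA point rest (i + 1) bc bd true
    else pvLoopA point rest (i + 1) bc bd argue

def find_closest_center (point : Int × Int) (centers : List (Int × Int)) : Option Int :=
  match centers with
  | [] => none  -- Python raises IndexError here (excluded by Pre_)
  | c0 :: rest =>
    let st := pvLoopA point rest 1 0 (manhattan_distance point c0) false
    if st.2.2 then none else some st.1

-- ===== PORT B =====
def find_closest_center_alt (point : Int × Int) (centers : List (Int × Int)) : Option Int :=
  let dists := centers.map (fun c => manhattan_distance point c)
  match PySem.List.min? dists (fun x => x) with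
  | none => none  -- Python min([]) raises ValueError (excluded by Pre_)
  | some best =>
    if PySem.List.count dists best > 1 then none
    else (PySem.List.index? dists best).map (fun k => (k : Int))

-- ===== PRECONDITION & SPEC =====
-- Pre_ excludes only empty centers, where A raises IndexError (and B ValueError).
def Pre_find_closest_center (point : Int × Int) (centers : List (Int × Int)) : Prop := centers ≠ []
instance (point : Int × Int) (centers : List (Int × Int)) : Decidable (Pre_find_closest_center point centers) := by unfold Pre_find_closest_center; infer_instance
def pvWitness_find_closest_center : (Int × Int) × (List (Int × Int)) := ((0, 0), [(1, 1)])

def Spec_find_closest_center (point : Int × Int) (centers : List (Int × Int)) (out : Option Int) : Prop := out = find_closest_center_alt point centers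
instance (point : Int × Int) (centers : List (Int × Int)) (out : Option Int) : Decidable (Spec_find_closest_center point centers out) := by unfold Spec_find_closest_center; infer_instance

-- ===== CLAIM (what is proved, stated in full; the proofs are below) =====
def Claim_equal_find_closest_center : Prop := ∀ (point : Int × Int) (centers : List (Int × Int)), Dom_find_closest_center point centers → Pre_find_closest_center point centers → Spec_find_closest_center point centers (find_closest_center point centers)

-- ===== LEMMAS AND PROOFS =====

-- A's loop on the list of distances only (the centers enter only through their distance).
def pvLoopD : List Int → Int → Int → Int → Bool → Int × Int × Bool
  | [], _, bc, bd, argue => (bc, bd, argue)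
  | d :: rest, i, bc, bd, argue =>
    if d < bd then pvLoopD rest (i + 1) i d false
    else if d = bd then pvLoopD rest (i + 1) bc bd true
    else pvLoopD rest (i + 1) bc bd argue

theorem loopA_eq_loopD (point : Int × Int) :
    ∀ (cs : List (Int × Int)) (i bc bd : Int) (argue : Bool),
    pvLoopA point cs i bc bd argue
      = pvLoopD (cs.map (fun c => manhattan_distance point c)) i bc bd argue := by
  intro cs
  induction cs with
  | nil => intro i bc bd argue; rfl
  | cons c rest ih =>
      intro i bc bd argue
      simp only [pvLoopA, pvLoopD, List.map]
      split_ifs <;> apply ih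

-- min of a nonempty list, as A maintains it
def pvMn : List Int → Int
  | [] => 0
  | x :: t => t.foldl min x

-- first index of the min, as an Int
def pvFidx (L : List Int) : Int := ((PySem.List.index? L (pvMn L)).getD 0 : Nat)

def pvSt (L : List Int) : Int × Int × Bool :=
  (pvFidx L, pvMn L, decide (2 ≤ L.count (pvMn L)))

theorem foldl_min_le : ∀ (t : List Int) (x : Int), t.foldl min x ≤ x ∧ ∀ y ∈ t, t.foldl min x ≤ y := by
  intro t
  induction t with
  | nil => intro x; simp
  | cons a t ih =>
      intro x
      have h := ih (min x a)
      constructor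
      · exact le_trans h.1 (min_le_left _ _)
      · intro y hy
        rcases List.mem_cons.mp hy with rfl | hy
        · exact le_trans h.1 (min_le_right _ _)
        · exact h.2 y hy

theorem pvMn_le {L : List Int} (h : L ≠ []) : ∀ y ∈ L, pvMn L ≤ y := by
  cases L with
  | nil => simp at h
  | cons x t =>
      intro y hy
      rcases List.mem_cons.mp hy with rfl | hy
      · exact (foldl_min_le t y).1
      · exact (foldl_min_le t x).2 y hy

theorem foldl_min_mem : ∀ (t : List Int) (x : Int), t.foldl min x = x ∨ t.foldl min x ∈ t := by
  intro t
  induction t with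
  | nil => intro x; left; rfl
  | cons a t ih =>
      intro x
      rcases ih (min x a) with h | h
      · rcases min_cases x a with ⟨h1, _⟩ | ⟨h1, _⟩
        · left; rw [List.foldl_cons, h, h1]
        · right; rw [List.foldl_cons, h, h1]; exact List.mem_cons_self
      · right; rw [List.foldl_cons]; exact List.mem_cons_of_mem _ h

theorem pvMn_mem {L : List Int} (h : L ≠ []) : pvMn L ∈ L := by
  cases L with
  | nil => simp at h
  | cons x t =>
      rcases foldl_min_mem t x with h1 | h1
      · simp [pvMn, h1]
      · exact List.mem_cons_of_mem _ (by simpa [pvMn] using h1)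

theorem pvMn_snoc {L : List Int} (h : L ≠ []) (d : Int) : pvMn (L ++ [d]) = min (pvMn L) d := by
  cases L with
  | nil => simp at h
  | cons x t => simp [pvMn, List.foldl_append]

-- the three snoc steps of the state
theorem pvSt_snoc_lt {L : List Int} (h : L ≠ []) {d : Int} (hd : d < pvMn L) :
    pvSt (L ++ [d]) = ((L.length : Int), d, false) := by
  have hmn : pvMn (L ++ [d]) = d := by
    rw [pvMn_snoc h]; exact min_eq_right (le_of_lt hd)
  have hnot : d ∉ L := fun hm => absurd (pvMn_le h d hm) (not_le.mpr hd)
  have hidx : PySem.List.index? (L ++ [d]) d = some L.length :=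
    PySem.List.index?_append_singleton_self L d hnot
  have hcount : (L ++ [d]).count d = 1 := by
    rw [List.count_append]
    simp [List.count_eq_zero_of_not_mem hnot]
  unfold pvSt pvFidx
  rw [hmn, hidx, hcount]
  simp

theorem pvSt_snoc_eq {L : List Int} (h : L ≠ []) {d : Int} (hd : d = pvMn L) :
    pvSt (L ++ [d]) = (pvFidx L, pvMn L, true) := by
  have hmn : pvMn (L ++ [d]) = pvMn L := by
    rw [pvMn_snoc h, hd]; exact min_self _
  have hidx : PySem.List.index? (L ++ [d]) (pvMn L) = PySem.List.index? L (pvMn L) :=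
    PySem.List.index?_append_of_mem _ (pvMn_mem h)
  have hcount : (L ++ [d]).count (pvMn L) = L.count (pvMn L) + 1 := by
    rw [List.count_append]; simp [hd]
  have hone : 1 ≤ L.count (pvMn L) := List.one_le_count_iff.mpr (pvMn_mem h)
  unfold pvSt pvFidx
  rw [hmn, hidx, hcount]
  have h2 : 2 ≤ L.count (pvMn L) + 1 := by omega
  simp [h2]

theorem pvSt_snoc_gt {L : List Int} (h : L ≠ []) {d : Int} (hd : pvMn L < d) :
    pvSt (L ++ [d]) = pvSt L := by
  have hmn : pvMn (L ++ [d]) = pvMn L := by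
    rw [pvMn_snoc h]; exact min_eq_left (le_of_lt hd)
  have hidx : PySem.List.index? (L ++ [d]) (pvMn L) = PySem.List.index? L (pvMn L) :=
    PySem.List.index?_append_of_mem _ (pvMn_mem h)
  have hcount : (L ++ [d]).count (pvMn L) = L.count (pvMn L) := by
    rw [List.count_append]; simp [ne_of_gt hd]
  unfold pvSt pvFidx
  rw [hmn, hidx, hcount]

-- the loop invariant: starting from the state describing a nonempty processed prefix L,
-- running the loop on rest yields the state describing L ++ rest
theorem loopD_invariant : ∀ (rest L : List Int), L ≠ [] →
    pvLoopD rest (L.length : Int) (pvFidx L) (pvMn L) (decide (2 ≤ L.count (pvMn L)))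
      = pvSt (L ++ rest) := by
  intro rest
  induction rest with
  | nil => intro L h; simp [pvLoopD, pvSt]
  | cons d rest ih =>
      intro L h
      have hne : L ++ [d] ≠ [] := by simp
      have hlen : ((L ++ [d]).length : Int) = (L.length : Int) + 1 := by simp
      have this0 := ih (L ++ [d]) hne
      rw [List.append_assoc] at this0
      simp only [List.singleton_append] at this0
      simp only [pvLoopD]
      rcases lt_trichotomy d (pvMn L) with hd | hd | hd
      · rw [if_pos hd]
        have h3 := pvSt_snoc_lt h hd
        unfold pvSt at h3
        simp only [Prod.mk.injEq] at h3
        obtain ⟨hf, hm2, ha⟩ := h3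
        rw [hlen, ha, hm2, hf] at this0
        exact this0
      · rw [if_neg (by omega), if_pos hd]
        have h3 := pvSt_snoc_eq h hd
        unfold pvSt at h3
        simp only [Prod.mk.injEq] at h3
        obtain ⟨hf, hm2, ha⟩ := h3
        rw [hlen, ha, hm2, hf] at this0
        exact this0
      · rw [if_neg (by omega), if_neg (by omega)]
        have h3 := pvSt_snoc_gt h hd
        unfold pvSt at h3
        simp only [Prod.mk.injEq] at h3
        obtain ⟨hf, hm2, ha⟩ := h3
        rw [hlen, ha, hm2, hf] at this0
        exact this0

-- reading the final state of A's loop off against B's min/count/index reduction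
theorem pvFinal (dists : List Int) (h : dists ≠ []) :
    (if (pvSt dists).2.2 then none else some (pvSt dists).1)
      = (match PySem.List.min? dists (fun x => x) with
         | none => none
         | some best =>
             if PySem.List.count dists best > 1 then none
             else (PySem.List.index? dists best).map (fun k => (k : Int))) := by
  have hmem : pvMn dists ∈ dists := pvMn_mem h
  have hmin : PySem.List.min? dists (fun x => x) = some (pvMn dists) := by
    cases dists with
    | nil => simp at h
    | cons x t => rw [PySem.List.min?_id_cons]; rfl
  obtain ⟨k, hk⟩ := Option.isSome_iff_exists.mp
    ((PySem.List.index?_isSome_iff dists (pvMn dists)).mpr hmem)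
  simp only [hmin, PySem.List.count_eq]
  by_cases hc : 2 ≤ List.count (pvMn dists) dists
  · have hc' : 1 < List.count (pvMn dists) dists := by omega
    simp [pvSt, hc, hc']
  · have hc' : ¬ 1 < List.count (pvMn dists) dists := by omega
    simp only [PySem.List.index?_eq_idxOf?] at hk
    simp [pvSt, hc, hc', pvFidx, hk]

-- ===== VERDICT (by name: the statement is the Claim_ definition above) =====
theorem find_closest_center_spec : Claim_equal_find_closest_center := by
  intro point centers _ hpre
  unfold Spec_find_closest_center
  match centers with
  | [] => exact absurd rfl hpre
  | c0 :: rest =>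
    have hA : pvLoopA point rest 1 0 (manhattan_distance point c0) false
        = pvSt ((c0 :: rest).map (fun c => manhattan_distance point c)) := by
      rw [loopA_eq_loopD]
      have := loopD_invariant (rest.map (fun c => manhattan_distance point c))
        [manhattan_distance point c0] (by simp)
      simpa [pvFidx, pvMn, PySem.List.index?_cons_self] using this
    simp only [find_closest_center, find_closest_center_alt]
    rw [hA]
    exact pvFinal _ (by simp)
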